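-- pv_equiv track=rewrite | github.com/cafrii/omega2 | 백준/Gold/28069. 김밥천국의 계단/a28069_fail.py | solve
-- ===== SOURCE A (Python) =====
-- def solve(N:int, K:int)->str:
--     '''
--     Args:
--         N: target goal
--         K: allowed steps
--     Returns:
--         str
--     '''
--
--     def find_prev(n:int)->int:
--         '''
--         find i, which i + (i//2) == n
--         return >N if not exist
--         '''
--         f,i = n/3,n//3
--         if f == i:
--             return i*2
--         i = int(f*2)
--         # there are lower canidates: i, i+1
--         if i + i//2 == n: return i
--         if (i+1) + (i+1)//2 == n: return i+1
--         return N+1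
--
--     dp = [0] * (N+1)
--     dp[N] = 1
--     mn,mx = N,N
--
--     for k in range(1, K+1):
--         dpx = [0] * (N+1)
--         mn2 = mx  # next mn value
--         for n in range(mx, mn-1, -1):
--             if not dp[n]: continue
--             nx1, nx2 = n-1, find_prev(n)
--             if nx1 >= 0:
--                 dpx[nx1] = 1
--                 mn2 = min(mn2, nx1)
--             if nx2 <= N:
--                 dpx[nx2] = 1
--                 mn2 = min(mn2, nx2)
--         dp = dpx
--         mn,mx = mn2, mx-1
--         # log("k %3d, (%d~%d): dp %s", k, mn,mx, dp)
--
--     # dp[0]에 K번째 도달 가능 여부 정보가 저장되어 있음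
--     return 'minigimbob' if dp[0] > 0 else 'water'
-- ===== SOURCE B (Python) =====
-- def solve(N: int, K: int) -> str:
--     '''
--     Forward shortest-path DP instead of A's K-round backward frontier
--     simulation: dp[i] = fewest stair moves (j -> j+1 or j -> j + j//2)
--     from 0 to i.  A's shrinking-window simulation accepts exactly the
--     step counts K with dp[N] <= K <= N+1 (waiting is possible only on
--     stair 0 and only while its window is open, i.e. for K <= N+1).
--     '''
--     dp = [0] * (N + 1)
--     for i in range(1, N + 1):
--         best = dp[i - 1]
--         p = (2 * i) // 3  # the only j with j + j//2 == i can be p or p+1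
--         if p + p // 2 == i and p < i:
--             best = min(best, dp[p])
--         elif (p + 1) + (p + 1) // 2 == i and p + 1 < i:
--             best = min(best, dp[p + 1])
--         dp[i] = best + 1
--     return 'minigimbob' if dp[N] <= K <= N + 1 else 'water'
-- ===== Notes on version B (the rewrite author's own statement) =====
-- stated objective: faster
-- what changed: Replaces A's K-round backward frontier simulation (rebuilding a dense 0/1 array of live positions each round under a shrinking window) by a single forward shortest-path DP computing dp[i] = fewest moves from stair 0 to stair i, and answers via the closed-form acceptance condition dp[N] <= K <= N+1.
-- intended difference: For K < 0 with N = 0, A's round loop never runs and it answers 'minigimbob' as if K were 0, while B answers 'water' because no path has negative length, the intended reading of reaching 0 in exactly K steps. — e.g. on solve(0, -1): A returns "minigimbob", B returns "water"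
import Mathlib
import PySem

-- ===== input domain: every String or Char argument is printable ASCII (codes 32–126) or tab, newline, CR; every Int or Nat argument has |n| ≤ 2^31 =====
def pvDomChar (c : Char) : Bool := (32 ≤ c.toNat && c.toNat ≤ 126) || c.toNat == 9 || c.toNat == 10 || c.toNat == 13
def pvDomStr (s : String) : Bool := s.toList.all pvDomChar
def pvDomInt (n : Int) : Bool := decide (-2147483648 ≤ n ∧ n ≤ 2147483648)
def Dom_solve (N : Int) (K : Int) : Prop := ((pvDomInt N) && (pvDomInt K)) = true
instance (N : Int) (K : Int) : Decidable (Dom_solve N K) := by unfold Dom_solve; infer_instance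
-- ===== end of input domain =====

-- B replaces A's K-round backward frontier simulation by a single forward shortest-path DP
-- (dp[i] = fewest moves from stair 0 to stair i) with the closed-form acceptance dp[N] ≤ K ≤ N+1
-- (objective: faster).

-- ===== PORT A =====
-- Python's list indexing / assignment on the dp arrays, ported with Lean Arrays so the
-- ports evaluate in O(1) per access. Exact for 0 <= i < size — which holds for every
-- access the ports make on inputs in Pre_ (proved below); Python raises outside.
def aget (xs : Array Int) (i : Int) : Int := xs.getD i.toNat 0
def aset (xs : Array Int) (i : Int) (v : Int) : Array Int := xs.setIfInBounds i.toNat v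
-- find_prev: A computes 'f = n/3' with floats and 'int(f*2)'. For every n this is called with
-- (0 ≤ n ≤ 2^31 + 1) the float comparison f == i holds exactly when n % 3 == 0, and
-- int(f*2) = (2*n)//3 (the float error is ≪ the fractional part 1/3 of 2n/3), so this
-- integer port is exact there.
def findPrevA (N : Int) (n : Int) : Int :=
  if PySem.Int.mod n 3 = 0 then (PySem.Int.floordiv n 3) * 2
  else
    let i := PySem.Int.floordiv (2 * n) 3
    if i + PySem.Int.floordiv i 2 = n then i
    else if (i + 1) + PySem.Int.floordiv (i + 1) 2 = n then i + 1
    else N + 1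

-- body of 'for n in range(mx, mn-1, -1)'; acc = (dpx, mn2).
-- acc = (dpx, mn2); all reads and writes are in range on every state A reaches with 0 ≤ N
-- (proved below), so aget/aset agree with Python's dp[n] / dpx[..] = ...
def scanBodyA (N : Int) (dp : Array Int) (acc : Array Int × Int) (n : Int) : Array Int × Int :=
  if aget dp n = 0 then acc      -- 'if not dp[n]: continue'
  else
    let nx1 := n - 1
    let nx2 := findPrevA N n
    let acc1 := if 0 ≤ nx1 then (aset acc.1 nx1 1, min acc.2 nx1) else acc
    if nx2 ≤ N then (aset acc1.1 nx2 1, min acc1.2 nx2) else acc1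

-- one iteration of the k-loop; state = (dp, mn, mx)
def stepA (N : Int) (st : Array Int × Int × Int) : Array Int × Int × Int :=
  let r := (PySem.List.pyRange st.2.2 (st.2.1 - 1) (-1)).foldl (scanBodyA N st.1)
             (Array.replicate (N + 1).toNat 0, st.2.2)
  (r.1, r.2, st.2.2 - 1)

def solve (N : Int) (K : Int) : String :=
  let dp0 := aset (Array.replicate (N + 1).toNat 0) N 1   -- dp[N] = 1 (IndexError for N < 0: outside Pre_)
  let st := (PySem.List.pyRange 1 (K + 1) 1).foldl (fun st _ => stepA N st) (dp0, N, N)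
  if 0 < aget st.1 0 then "minigimbob" else "water"

-- ===== PORT B =====
-- one iteration of Source B's 'for i in range(1, N+1)': dp[i] = best + 1
def bStep (dp : Array Int) (i : Int) : Array Int :=
  let best := aget dp (i - 1)
  let p := PySem.Int.floordiv (2 * i) 3
  let best2 :=
    if p + PySem.Int.floordiv p 2 = i ∧ p < i then min best (aget dp p)
    else if (p + 1) + PySem.Int.floordiv (p + 1) 2 = i ∧ p + 1 < i then
      min best (aget dp (p + 1))
    else best
  aset dp i (best2 + 1)

def solve_alt (N : Int) (K : Int) : String :=
  let dp := (PySem.List.pyRange 1 (N + 1) 1).foldl bStep (Array.replicate (N + 1).toNat 0)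
  if aget dp N ≤ K ∧ K ≤ N + 1 then "minigimbob" else "water"

-- ===== PRECONDITION & SPEC =====
-- Pre_ excludes exactly N < 0, where A raises IndexError on 'dp[N] = 1'.
def Pre_solve (N : Int) (K : Int) : Prop := 0 ≤ N
instance (N : Int) (K : Int) : Decidable (Pre_solve N K) := by unfold Pre_solve; infer_instance
def pvWitness_solve : Int × Int := (3, 2)

-- For K < 0 with N = 0, A's round loop never runs and it answers 'minigimbob' as if K were 0,
-- while B answers 'water' because no path has negative length, the intended reading of
-- reaching stair 0 in exactly K steps.
def D_solve (N : Int) (K : Int) : Prop := N = 0 ∧ K < 0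
instance (N : Int) (K : Int) : Decidable (D_solve N K) := by unfold D_solve; infer_instance

def Spec_solve (N : Int) (K : Int) (out : String) : Prop := ¬ D_solve N K → out = solve_alt N K
instance (N : Int) (K : Int) (out : String) : Decidable (Spec_solve N K out) := by unfold Spec_solve; infer_instance

def pvDiffWitness_solve : Int × Int := (0, -1)
def pvDiffWitnessOut_solve : String × String := ("minigimbob", "water")

-- ===== CLAIM (what is proved, stated in full; the proofs are below) =====
def Claim_unchanged_solve : Prop := ∀ (N : Int) (K : Int), Dom_solve N K → Pre_solve N K → Spec_solve N K (solve N K)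
def Claim_changed_solve : Prop := Dom_solve (pvDiffWitness_solve.1) (pvDiffWitness_solve.2) ∧ Pre_solve (pvDiffWitness_solve.1) (pvDiffWitness_solve.2) ∧ D_solve (pvDiffWitness_solve.1) (pvDiffWitness_solve.2) ∧ solve (pvDiffWitness_solve.1) (pvDiffWitness_solve.2) = pvDiffWitnessOut_solve.1 ∧ solve_alt (pvDiffWitness_solve.1) (pvDiffWitness_solve.2) = pvDiffWitnessOut_solve.2 ∧ pvDiffWitnessOut_solve.1 ≠ pvDiffWitnessOut_solve.2
def Claim_exact_solve : Prop := ∀ (N : Int) (K : Int), Dom_solve N K → Pre_solve N K → D_solve N K → solve N K ≠ solve_alt N K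

-- ===== LEMMAS AND PROOFS =====

def getv (xs : Array Int) (i : Int) : Int := aget xs i

theorem size_aset (xs : Array Int) (i v : Int) : (aset xs i v).size = xs.size := by
  simp [aset]

-- proof-side option-valued find_prev (the unique j with j + j//2 = n, if any)
def findPrevQ (n : Int) : Option Int :=
  let i := PySem.Int.floordiv (2 * n) 3
  if i + PySem.Int.floordiv i 2 = n then some i
  else if (i + 1) + PySem.Int.floordiv (i + 1) 2 = n then some (i + 1)
  else none

-- one admissible reverse move n → m of the simulation
def succMem (N m n : Int) : Prop := (m = n - 1 ∧ 0 ≤ m) ∨ (findPrevQ n = some m ∧ m ≤ N)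

-- positions reachable from N after k capped rounds (position used at round k must be ≤ N - k)
def ReachR (N : Int) : Nat → Int → Prop
  | 0, n => n = N
  | (k+1), n => ∃ m, ReachR N k m ∧ m ≤ N - (k : Int) ∧ succMem N n m

-- Source B's dp values, as a recursive function
def dVal : Nat → Nat
  | 0 => 0
  | (i+1) =>
    let q := (2 * (i + 1)) / 3
    let b1 := dVal i
    let b2 :=
      if h1 : q + q / 2 = i + 1 ∧ q < i + 1 then min b1 (dVal q)
      else if h2 : (q + 1) + (q + 1) / 2 = i + 1 ∧ q + 1 < i + 1 then min b1 (dVal (q + 1))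
      else b1
    b2 + 1
termination_by i => i
decreasing_by all_goals omega

theorem reachR_succ (N : Int) (k : Nat) (n : Int) :
    ReachR N (k+1) n ↔ ∃ m, ReachR N k m ∧ m ≤ N - (k : Int) ∧ succMem N n m := Iff.rfl

theorem findPrevQ_some {n p : Int} (h : findPrevQ n = some p) :
    p + PySem.Int.floordiv p 2 = n := by
  simp only [findPrevQ] at h
  split_ifs at h with h1 h2 <;> simp_all

theorem findPrevQ_nonneg {n p : Int} (hn : 0 ≤ n) (h : findPrevQ n = some p) : 0 ≤ p := by
  simp only [findPrevQ, PySem.Int.floordiv_eq_ediv_of_pos (by norm_num : (0:Int) < 3)] at h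
  split_ifs at h with h1 h2 <;> rw [Option.some.injEq] at h <;> omega

theorem findPrevA_eq (N n : Int) (hn : 0 ≤ n) :
    findPrevA N n = (findPrevQ n).getD (N + 1) := by
  simp only [findPrevA, findPrevQ,
    PySem.Int.mod_eq_emod_of_pos (b := 3) (by norm_num),
    PySem.Int.floordiv_eq_ediv_of_pos (by norm_num : (0:Int) < 3),
    PySem.Int.floordiv_eq_ediv_of_pos (by norm_num : (0:Int) < 2)]
  by_cases h0 : n % 3 = 0
  · have hc : 2 * n / 3 + 2 * n / 3 / 2 = n := by omega
    simp [h0, hc]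
    omega
  · simp [h0]
    split_ifs <;> simp

theorem foldl_const_iterate {α β : Type} (f : α → α) (l : List β) (a : α) :
    l.foldl (fun x _ => f x) a = f^[l.length] a := by
  induction l generalizing a with
  | nil => rfl
  | cons b l ih => simp [List.foldl, ih, Function.iterate_succ_apply]

theorem solve_eq_iterate (N K : Int) :
    solve N K = (if 0 < getv ((stepA N)^[K.toNat]
        (aset (Array.replicate (N + 1).toNat 0) N 1, N, N)).1 0
      then "minigimbob" else "water") := by
  simp only [solve, foldl_const_iterate, PySem.List.length_pyRange_one,
    add_sub_cancel_right, getv]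
  rfl

theorem reachR_nonneg {N : Int} (hN : 0 ≤ N) {k : Nat} {n : Int} (h : ReachR N k n) :
    0 ≤ n ∧ n ≤ N := by
  induction k generalizing n with
  | zero => subst h; omega
  | succ k ih =>
    rcases h with ⟨a, ha, _, hs⟩
    have hA := ih ha
    rcases hs with ⟨rfl, h0⟩ | ⟨hp, hle⟩
    · omega
    · have h1 := findPrevQ_some hp
      have h2 := findPrevQ_nonneg hA.1 hp
      rw [PySem.Int.floordiv_eq_ediv_of_pos (by norm_num)] at h1
      omega

theorem getv_replicate (t : Nat) (i : Int) : getv (Array.replicate t 0) i = 0 := by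
  unfold getv aget Array.getD
  split
  · simp
  · rfl

theorem getv_pySetD (xs : Array Int) (i j v : Int) (h0i : 0 ≤ i) (hi : i < (xs.size : Int))
    (h0j : 0 ≤ j) (hj : j < (xs.size : Int)) :
    getv (aset xs i v) j = if j = i then v else getv xs j := by
  unfold getv aget aset
  rw [Array.getD_eq_getD_getElem?, Array.getD_eq_getD_getElem?, Array.getElem?_setIfInBounds,
    Array.getElem?_eq_getElem (by omega : j.toNat < xs.size)]
  split_ifs <;> first | rfl | omega

theorem findPrevA_nonneg (N n : Int) (hN : 0 ≤ N) (hn : 0 ≤ n) : 0 ≤ findPrevA N n := by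
  simp only [findPrevA,
    PySem.Int.mod_eq_emod_of_pos (b := 3) (by norm_num),
    PySem.Int.floordiv_eq_ediv_of_pos (by norm_num : (0:Int) < 3),
    PySem.Int.floordiv_eq_ediv_of_pos (by norm_num : (0:Int) < 2)]
  split_ifs <;> omega

theorem scanBodyA_facts (N : Int) (hN : 0 ≤ N) (dp : Array Int) (acc : Array Int × Int) (a : Int)
    (ha0 : 0 ≤ a) (haN : a ≤ N) (hlen : acc.1.size = (N+1).toNat) :
    (scanBodyA N dp acc a).1.size = (N+1).toNat ∧
    (scanBodyA N dp acc a).2 ≤ acc.2 ∧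
    (0 ≤ acc.2 → 0 ≤ (scanBodyA N dp acc a).2) ∧
    (∀ m, 0 ≤ m → m ≤ N →
       getv (scanBodyA N dp acc a).1 m =
         (if getv dp a ≠ 0 ∧ ((m = a - 1 ∧ 0 ≤ m) ∨ (m = findPrevA N a ∧ m ≤ N)) then 1
          else getv acc.1 m)) ∧
    (∀ m, 0 ≤ m → m ≤ N → getv dp a ≠ 0 → ((m = a - 1 ∧ 0 ≤ m) ∨ (m = findPrevA N a ∧ m ≤ N)) →
       (scanBodyA N dp acc a).2 ≤ m) := by
  by_cases hdp : aget dp a = 0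
  · simp only [scanBodyA, hdp, if_pos]
    refine ⟨hlen, le_refl _, fun h => h, ?_, ?_⟩
    · intro m _ _
      rw [if_neg]
      intro ⟨hc, _⟩
      exact hc (by simpa [getv] using hdp)
    · intro m _ _ hc
      exact absurd (by simpa [getv] using hdp) hc
  · have hdp' : getv dp a ≠ 0 := by simpa [getv] using hdp
    have hfp := findPrevA_nonneg N a hN ha0
    simp only [scanBodyA, hdp, if_neg, ite_false]
    by_cases h1 : (0:Int) ≤ a - 1 <;> by_cases h2 : findPrevA N a ≤ N <;>
      simp only [h1, h2, if_pos, if_neg, ite_true, ite_false, not_true, not_false_iff]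
    -- h1, h2 : both writes
    · have hL1 : (aset acc.1 (a-1) 1).size = (N+1).toNat := by
        rw [size_aset]; exact hlen
      refine ⟨by rw [size_aset]; exact hL1, by omega,
        by omega, ?_, ?_⟩
      · intro m hm0 hmN
        rw [getv_pySetD _ _ _ _ hfp (by rw [hL1]; omega) hm0 (by rw [hL1]; omega),
            getv_pySetD _ _ _ _ h1 (by rw [hlen]; omega) hm0 (by rw [hlen]; omega)]
        simp only [ne_eq, hdp', not_false_iff, true_and]
        split_ifs <;> first | rfl | omega
      · intro m hm0 hmN _ hor
        omega
    -- h1, ¬h2 : only the decrement write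
    · refine ⟨by rw [size_aset]; exact hlen, by omega,
        by omega, ?_, ?_⟩
      · intro m hm0 hmN
        rw [getv_pySetD _ _ _ _ h1 (by rw [hlen]; omega) hm0 (by rw [hlen]; omega)]
        simp only [ne_eq, hdp', not_false_iff, true_and]
        split_ifs <;> first | rfl | omega
      · intro m hm0 hmN _ hor
        omega
    -- ¬h1, h2 : only the prev write
    · refine ⟨by rw [size_aset]; exact hlen, by omega,
        by omega, ?_, ?_⟩
      · intro m hm0 hmN
        rw [getv_pySetD _ _ _ _ hfp (by rw [hlen]; omega) hm0 (by rw [hlen]; omega)]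
        simp only [ne_eq, hdp', not_false_iff, true_and]
        split_ifs <;> first | rfl | omega
      · intro m hm0 hmN _ hor
        omega
    -- ¬h1, ¬h2 : no write
    · refine ⟨hlen, le_refl _, fun h => h, ?_, ?_⟩
      · intro m hm0 hmN
        rw [if_neg]
        rintro ⟨_, ⟨rfl, h⟩ | ⟨rfl, h⟩⟩ <;> omega
      · intro m hm0 hmN _ hor
        rcases hor with ⟨rfl, h⟩ | ⟨rfl, h⟩ <;> omega

theorem scan_foldl (N : Int) (hN : 0 ≤ N) (dp : Array Int) (L : List Int)
    (hL : ∀ n ∈ L, 0 ≤ n ∧ n ≤ N) (acc : Array Int × Int)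
    (hlen : acc.1.size = (N+1).toNat) (hmn0 : 0 ≤ acc.2)
    (hacc : ∀ m, 0 ≤ m → m ≤ N → getv acc.1 m ≠ 0 → acc.2 ≤ m)
    (hbit : ∀ m, 0 ≤ m → m ≤ N → getv acc.1 m = 0 ∨ getv acc.1 m = 1) :
    (L.foldl (scanBodyA N dp) acc).1.size = (N+1).toNat ∧
    0 ≤ (L.foldl (scanBodyA N dp) acc).2 ∧
    (∀ m, 0 ≤ m → m ≤ N → getv (L.foldl (scanBodyA N dp) acc).1 m ≠ 0 →
       (L.foldl (scanBodyA N dp) acc).2 ≤ m) ∧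
    (∀ m, 0 ≤ m → m ≤ N →
       getv (L.foldl (scanBodyA N dp) acc).1 m = 0 ∨ getv (L.foldl (scanBodyA N dp) acc).1 m = 1) ∧
    (∀ m, 0 ≤ m → m ≤ N →
       (getv (L.foldl (scanBodyA N dp) acc).1 m ≠ 0 ↔
         (getv acc.1 m ≠ 0 ∨ ∃ n ∈ L, getv dp n ≠ 0 ∧
           ((m = n - 1 ∧ 0 ≤ m) ∨ (m = findPrevA N n ∧ m ≤ N))))) := by
  induction L generalizing acc with
  | nil =>
    refine ⟨hlen, hmn0, hacc, hbit, ?_⟩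
    intro m hm0 hmN
    simp
  | cons a L ih =>
    obtain ⟨ha0, haN⟩ := hL a List.mem_cons_self
    obtain ⟨f1, f2, f3, f4, f5⟩ := scanBodyA_facts N hN dp acc a ha0 haN hlen
    rw [List.foldl_cons]
    have hacc' : ∀ m, 0 ≤ m → m ≤ N → getv (scanBodyA N dp acc a).1 m ≠ 0 →
        (scanBodyA N dp acc a).2 ≤ m := by
      intro m hm0 hmN hne
      rw [f4 m hm0 hmN] at hne
      split_ifs at hne with hc
      · exact f5 m hm0 hmN hc.1 hc.2
      · exact le_trans f2 (hacc m hm0 hmN hne)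
    have hbit' : ∀ m, 0 ≤ m → m ≤ N →
        getv (scanBodyA N dp acc a).1 m = 0 ∨ getv (scanBodyA N dp acc a).1 m = 1 := by
      intro m hm0 hmN
      rw [f4 m hm0 hmN]
      split_ifs with hc
      · exact Or.inr rfl
      · exact hbit m hm0 hmN
    obtain ⟨g1, g2, g3, g4, g5⟩ := ih (fun n hn => hL n (List.mem_cons_of_mem _ hn))
      (scanBodyA N dp acc a) f1 (f3 hmn0) hacc' hbit'
    refine ⟨g1, g2, g3, g4, ?_⟩
    intro m hm0 hmN
    rw [g5 m hm0 hmN, f4 m hm0 hmN]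
    constructor
    · rintro (h | ⟨n, hn, hf⟩)
      · split_ifs at h with hc
        · exact Or.inr ⟨a, List.mem_cons_self, hc⟩
        · exact Or.inl h
      · exact Or.inr ⟨n, List.mem_cons_of_mem _ hn, hf⟩
    · rintro (h | ⟨n, hn, hf⟩)
      · left
        split_ifs with hc
        · norm_num
        · exact h
      · rcases List.mem_cons.1 hn with rfl | hn
        · left
          rw [if_pos hf]
          norm_num
        · exact Or.inr ⟨n, hn, hf⟩

-- the invariant tying A's state after k rounds to the capped reachability relation
def InvA (N : Int) (k : Nat) (st : Array Int × Int × Int) : Prop :=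
  st.1.size = (N+1).toNat ∧ st.2.2 = N - k ∧
  (∀ n, 0 ≤ n → n ≤ N → (getv st.1 n ≠ 0 ↔ ReachR N k n)) ∧
  (∀ n, 0 ≤ n → n ≤ N → (getv st.1 n = 0 ∨ getv st.1 n = 1)) ∧
  (∀ n, 0 ≤ n → n ≤ N → getv st.1 n ≠ 0 → st.2.1 ≤ n) ∧
  (0 ≤ st.2.1 ∨ st.2.1 = st.2.2 + 1)

theorem invA_init (N : Int) (hN : 0 ≤ N) :
    InvA N 0 (aset (Array.replicate (N+1).toNat 0) N 1, N, N) := by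
  have hget : ∀ n : Int, 0 ≤ n → n ≤ N →
      getv (aset (Array.replicate (N+1).toNat 0) N 1) n = if n = N then 1 else 0 := by
    intro n h0 hn
    rw [getv_pySetD _ _ _ _ hN (by rw [Array.size_replicate]; omega) h0
         (by rw [Array.size_replicate]; omega)]
    split_ifs with h
    · rfl
    · exact getv_replicate _ _
  have hmem : ∀ n : Int, ReachR N 0 n ↔ n = N := fun n => Iff.rfl
  refine ⟨by rw [size_aset, Array.size_replicate], by simp, ?_, ?_, ?_, Or.inl hN⟩
  · intro n h0 hn
    rw [hget n h0 hn]
    split_ifs with h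
    · exact ⟨fun _ => (hmem n).2 h, fun _ => one_ne_zero⟩
    · constructor
      · intro hc; exact absurd rfl hc
      · intro hm; exact absurd ((hmem n).1 hm) h
  · intro n h0 hn
    rw [hget n h0 hn]
    split_ifs <;> simp
  · intro n h0 hn
    rw [hget n h0 hn]
    split_ifs with h
    · intro _; show N ≤ n; omega
    · intro hc; exact absurd rfl hc

theorem invA_step (N : Int) (hN : 0 ≤ N) (k : Nat)
    (st : Array Int × Int × Int) (h : InvA N k st) : InvA N (k+1) (stepA N st) := by
  obtain ⟨hlen, hmx, hiff, hbit, hmn, hmncase⟩ := h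
  by_cases hL : PySem.List.pyRange st.2.2 (st.2.1 - 1) (-1) = []
  · -- empty scan: the new dp is all zeros, and the capped relation has no live member either
    have hnolive : ∀ a : Int, ReachR N k a → a ≤ N - (k:Int) → False := by
      intro a haS hacap
      obtain ⟨ha0, haN⟩ := reachR_nonneg hN haS
      have hdp := (hiff a ha0 haN).2 haS
      have hmnle := hmn a ha0 haN hdp
      have haL : a ∈ PySem.List.pyRange st.2.2 (st.2.1 - 1) (-1) := by
        rcases hmncase with hc | hc
        · exact PySem.List.mem_pyRange_neg_one.2 ⟨by omega, by rw [hmx]; exact hacap⟩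
        · exfalso; rw [hmx] at hc; omega
      rw [hL] at haL
      cases haL
    simp only [stepA, hL, List.foldl_nil]
    refine ⟨by rw [Array.size_replicate], by push_cast; omega, ?_, ?_, ?_,
      Or.inr (by show st.2.2 = st.2.2 - 1 + 1; omega)⟩
    · intro n hn0 hnN
      rw [getv_replicate]
      constructor
      · intro hc; exact absurd rfl hc
      · intro hm
        exfalso
        rw [reachR_succ] at hm
        obtain ⟨a, haS, hacap, _⟩ := hm
        exact hnolive a haS hacap
    · intro n _ _
      rw [getv_replicate]
      exact Or.inl rfl
    · intro n _ _ hc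
      exact absurd (getv_replicate _ _) hc
  · -- nonempty scan
    have hmn0 : 0 ≤ st.2.1 := by
      rcases hmncase with hc | hc
      · exact hc
      · exact absurd (PySem.List.pyRange_neg_one_eq_nil (by omega)) hL
    have hmx0 : 0 ≤ st.2.2 := by
      obtain ⟨a, haL⟩ := List.exists_mem_of_ne_nil _ hL
      rcases PySem.List.mem_pyRange_neg_one.1 haL with ⟨hb1, hb2⟩
      omega
    have hLprop : ∀ n ∈ PySem.List.pyRange st.2.2 (st.2.1 - 1) (-1), 0 ≤ n ∧ n ≤ N := by
      intro n hn
      rcases PySem.List.mem_pyRange_neg_one.1 hn with ⟨hb1, hb2⟩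
      constructor <;> omega
    obtain ⟨g1, g2, g3, g4, g5⟩ := scan_foldl N hN st.1
        (PySem.List.pyRange st.2.2 (st.2.1 - 1) (-1)) hLprop
        (Array.replicate (N+1).toNat 0, st.2.2)
        (by simp) hmx0
        (fun m _ _ hne => absurd (getv_replicate _ _) hne)
        (fun m _ _ => Or.inl (getv_replicate _ _))
    refine ⟨g1, ?_, ?_, g4, g3, Or.inl g2⟩
    · show st.2.2 - 1 = N - ((k+1 : Nat) : Int)
      push_cast
      omega
    · intro n hn0 hnN
      show getv ((PySem.List.pyRange st.2.2 (st.2.1 - 1) (-1)).foldl (scanBodyA N st.1)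
          (Array.replicate (N+1).toNat 0, st.2.2)).1 n ≠ 0 ↔ _
      rw [g5 n hn0 hnN, reachR_succ]
      constructor
      · rintro (h0 | ⟨a, haL, hane, hsucc⟩)
        · exact absurd (getv_replicate _ _) h0
        · rcases PySem.List.mem_pyRange_neg_one.1 haL with ⟨hb1, hb2⟩
          rw [hmx] at hb2
          have ha0 : 0 ≤ a := by omega
          have haN : a ≤ N := by omega
          have haS := (hiff a ha0 haN).1 hane
          rcases hsucc with ⟨rfl, hm0⟩ | ⟨rfl, hmN2⟩
          · exact ⟨a, haS, hb2, Or.inl ⟨rfl, hm0⟩⟩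
          · rw [findPrevA_eq N a ha0] at hmN2 ⊢
            rcases hfp : findPrevQ a with _ | p
            · rw [hfp] at hmN2
              simp only [Option.getD_none] at hmN2
              omega
            · rw [hfp] at hmN2
              simp only [Option.getD_some] at hmN2 ⊢
              exact ⟨a, haS, hb2, Or.inr ⟨hfp, hmN2⟩⟩
      · intro hm
        obtain ⟨a, haS, hacap, hsucc⟩ := hm
        obtain ⟨ha0, haN⟩ := reachR_nonneg hN haS
        have hdp : getv st.1 a ≠ 0 := (hiff a ha0 haN).2 haS
        have hmnle := hmn a ha0 haN hdp
        have haL : a ∈ PySem.List.pyRange st.2.2 (st.2.1 - 1) (-1) :=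
          PySem.List.mem_pyRange_neg_one.2 ⟨by omega, by rw [hmx]; exact hacap⟩
        refine Or.inr ⟨a, haL, hdp, ?_⟩
        rcases hsucc with ⟨rfl, hm0⟩ | ⟨hfp, hle⟩
        · exact Or.inl ⟨rfl, hm0⟩
        · refine Or.inr ⟨?_, hle⟩
          rw [findPrevA_eq N a ha0, hfp]
          rfl

theorem invA_iter (N : Int) (hN : 0 ≤ N) :
    ∀ k : Nat,
      InvA N k ((stepA N)^[k] (aset (Array.replicate (N+1).toNat 0) N 1, N, N)) := by
  intro k
  induction k with
  | zero => exact invA_init N hN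
  | succ k ih =>
    rw [Function.iterate_succ_apply']
    exact invA_step N hN k _ ih

theorem dVal_zero : dVal 0 = 0 := by rw [dVal]

theorem dVal_succ_le (i : Nat) : dVal (i+1) ≤ dVal i + 1 := by
  rw [dVal]
  split_ifs with h1 h2
  · have := min_le_left (dVal i) (dVal ((2*(i+1))/3)); omega
  · have := min_le_left (dVal i) (dVal ((2*(i+1))/3 + 1)); omega
  · omega

theorem dVal_pos (i : Nat) (h : 1 ≤ i) : 1 ≤ dVal i := by
  obtain ⟨j, rfl⟩ : ∃ j, i = j + 1 := ⟨i - 1, by omega⟩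
  rw [dVal]
  split_ifs <;> omega

theorem prev_cases (p n : Nat) (h : p + p/2 = n) : p = (2*n)/3 ∨ p = (2*n)/3 + 1 := by
  obtain ⟨a, ha⟩ : ∃ a, p = 2*a ∨ p = 2*a + 1 := ⟨p/2, by omega⟩
  rcases ha with rfl | rfl
  · left; omega
  · right; omega

theorem dVal_jump (p n : Nat) (hp : p + p/2 = n) (hlt : p < n) : dVal n ≤ dVal p + 1 := by
  obtain ⟨i, rfl⟩ : ∃ i, n = i + 1 := ⟨n - 1, by omega⟩
  rw [dVal]
  have hpq := prev_cases p (i+1) hp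
  split_ifs with h1 h2
  · rcases hpq with rfl | hq1
    · have := min_le_right (dVal i) (dVal ((2*(i+1))/3)); omega
    · exfalso; omega
  · rcases hpq with hq1 | rfl
    · exfalso; omega
    · have := min_le_right (dVal i) (dVal ((2*(i+1))/3 + 1)); omega
  · exfalso; rcases hpq with rfl | rfl <;> omega

theorem findPrevQ_natCast (n : Nat) :
    findPrevQ (n : Int) =
      (if (2*n)/3 + ((2*n)/3)/2 = n then some (((2*n)/3 : Nat) : Int)
       else if ((2*n)/3 + 1) + ((2*n)/3 + 1)/2 = n then some ((((2*n)/3 + 1 : Nat)) : Int)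
       else none) := by
  simp only [findPrevQ,
    PySem.Int.floordiv_eq_ediv_of_pos (by norm_num : (0:Int) < 3),
    PySem.Int.floordiv_eq_ediv_of_pos (by norm_num : (0:Int) < 2)]
  have hq : (2 * (n:Int)) / 3 = ((2*n)/3 : Nat) := by omega
  rw [hq]
  by_cases hA : (2*n)/3 + ((2*n)/3)/2 = n
  · rw [if_pos (by omega), if_pos hA]
  · rw [if_neg (by omega), if_neg hA]
    by_cases hB : ((2*n)/3 + 1) + ((2*n)/3 + 1)/2 = n
    · rw [if_pos (by push_cast; omega), if_pos hB]
      push_cast; ring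
    · rw [if_neg (by push_cast; omega), if_neg hB]

theorem findPrevQ_zero : findPrevQ 0 = some 0 := by decide

theorem dVal_chain (n : Nat) (hn : 1 ≤ n) :
    ∃ c : Nat, c < n ∧ dVal c + 1 = dVal n ∧
      ((c : Int) = (n : Int) - 1 ∨ findPrevQ (n : Int) = some (c : Int)) := by
  obtain ⟨i, rfl⟩ : ∃ i, n = i + 1 := ⟨n - 1, by omega⟩
  have hfq := findPrevQ_natCast (i+1)
  rw [dVal]
  split_ifs with h1 h2
  · by_cases hm : dVal ((2*(i+1))/3) ≤ dVal i
    · refine ⟨(2*(i+1))/3, h1.2, by rw [min_eq_right hm], Or.inr ?_⟩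
      rw [hfq, if_pos h1.1]
    · exact ⟨i, by omega, by rw [min_eq_left (by omega)], Or.inl (by push_cast; ring)⟩
  · by_cases hm : dVal ((2*(i+1))/3 + 1) ≤ dVal i
    · refine ⟨(2*(i+1))/3 + 1, h2.2, by rw [min_eq_right hm], Or.inr ?_⟩
      rw [hfq, if_neg (by omega), if_pos h2.1]
    · exact ⟨i, by omega, by rw [min_eq_left (by omega)], Or.inl (by push_cast; ring)⟩
  · exact ⟨i, by omega, rfl, Or.inl (by push_cast; ring)⟩

theorem reach_dist {N : Int} (hN : 0 ≤ N) {k : Nat} {n : Int} (h : ReachR N k n) :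
    dVal N.toNat ≤ dVal n.toNat + k := by
  induction k generalizing n with
  | zero => subst h; omega
  | succ k ih =>
    obtain ⟨m, hm, _, hs⟩ := h
    have hmn := reachR_nonneg hN hm
    have key : dVal m.toNat ≤ dVal n.toNat + 1 := by
      rcases hs with ⟨rfl, h0⟩ | ⟨hp, _⟩
      · have hmt : m.toNat = (m-1).toNat + 1 := by omega
        rw [hmt]
        exact dVal_succ_le _
      · have h1 := findPrevQ_some hp
        have h0n : 0 ≤ n := findPrevQ_nonneg hmn.1 hp
        rw [PySem.Int.floordiv_eq_ediv_of_pos (by norm_num)] at h1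
        have h2 : n.toNat + n.toNat/2 = m.toNat := by omega
        by_cases hlt : n.toNat < m.toNat
        · exact dVal_jump _ _ h2 hlt
        · have he : n.toNat = m.toNat := by omega
          have : dVal n.toNat = dVal m.toNat := by rw [he]
          omega
    have := ih hm
    omega

theorem reach_cap {N : Int} (hN : 0 ≤ N) {k : Nat} {n : Int} (h : ReachR N k n) :
    (k : Int) ≤ N - n + (if n ≤ 1 then 1 else 0) := by
  induction k generalizing n with
  | zero => subst h; split_ifs <;> omega
  | succ k ih =>
    obtain ⟨m, hm, hcap, hs⟩ := h
    have hmn := reachR_nonneg hN hm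
    have hcapI := ih hm
    push_cast
    rcases hs with ⟨rfl, h0⟩ | ⟨hp, _⟩
    · split_ifs at hcapI ⊢ <;> omega
    · have h1 := findPrevQ_some hp
      have h0n : 0 ≤ n := findPrevQ_nonneg hmn.1 hp
      rw [PySem.Int.floordiv_eq_ediv_of_pos (by norm_num)] at h1
      split_ifs at hcapI ⊢ <;> omega

theorem chain_reach {N : Int} (hN : 0 ≤ N) :
    ∀ j : Nat, j ≤ dVal N.toNat →
      ∃ c : Nat, ReachR N j (c : Int) ∧ (c : Int) ≤ N - j ∧ dVal c = dVal N.toNat - j := by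
  intro j
  induction j with
  | zero =>
    intro _
    exact ⟨N.toNat, show ((N.toNat : Nat) : Int) = N by omega, by omega, by omega⟩
  | succ j ih =>
    intro hj
    obtain ⟨c, hc, hcap, hd⟩ := ih (by omega)
    have hc1 : 1 ≤ c := by
      rcases Nat.eq_zero_or_pos c with rfl | hpos
      · rw [dVal_zero] at hd; omega
      · exact hpos
    obtain ⟨c', hlt, hdc, hedge⟩ := dVal_chain c hc1
    refine ⟨c', ?_, by push_cast; push_cast at hcap; omega, by omega⟩
    rw [reachR_succ]
    refine ⟨(c : Int), hc, by push_cast at hcap ⊢; omega, ?_⟩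
    rcases hedge with he | he
    · exact Or.inl ⟨by omega, by omega⟩
    · exact Or.inr ⟨he, by push_cast at hcap ⊢; omega⟩

theorem reach_zero_up {N : Int} (hN : 0 ≤ N) :
    ∀ k j : Nat, ReachR N j 0 → j ≤ k → (k : Int) ≤ N + 1 → ReachR N k 0 := by
  intro k
  induction k with
  | zero =>
    intro j h hj _
    have : j = 0 := by omega
    subst this; exact h
  | succ k ih =>
    intro j h hj hk
    rcases Nat.eq_or_lt_of_le hj with rfl | hlt
    · exact h
    · have hkr := ih j h (by omega) (by push_cast at hk ⊢; omega)
      exact ⟨0, hkr, by push_cast at hk ⊢; omega, Or.inr ⟨findPrevQ_zero, hN⟩⟩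

theorem reach_iff {N : Int} (hN : 0 ≤ N) (k : Nat) :
    ReachR N k 0 ↔ (dVal N.toNat ≤ k ∧ (k : Int) ≤ N + 1) := by
  constructor
  · intro h
    have h1 := reach_dist hN h
    have h2 := reach_cap hN h
    rw [show (0:Int).toNat = 0 from rfl, dVal_zero] at h1
    rw [if_pos (by norm_num : (0:Int) ≤ 1)] at h2
    exact ⟨by omega, by omega⟩
  · rintro ⟨h1, h2⟩
    obtain ⟨c, hc, _, hd⟩ := chain_reach hN (dVal N.toNat) le_rfl
    have hc0 : c = 0 := by
      rcases Nat.eq_zero_or_pos c with rfl | hpos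
      · rfl
      · have := dVal_pos c hpos; omega
    subst hc0
    exact reach_zero_up hN k (dVal N.toNat) hc h1 h2

theorem bdp_spec (N : Int) (hN : 0 ≤ N) :
    ∀ t : Nat, (t : Int) ≤ N →
      ((PySem.List.pyRange 1 ((t:Int)+1) 1).foldl bStep (Array.replicate (N+1).toNat 0)).size
          = (N+1).toNat ∧
      (∀ j : Nat, j ≤ t →
        aget
            ((PySem.List.pyRange 1 ((t:Int)+1) 1).foldl bStep (Array.replicate (N+1).toNat 0))
            (j : Int)
          = ((dVal j : Nat) : Int)) := by
  intro t
  induction t with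
  | zero =>
    intro _
    rw [PySem.List.pyRange_one_eq_nil (by norm_num), List.foldl_nil]
    refine ⟨by rw [Array.size_replicate], ?_⟩
    intro j hj
    have hj0 : j = 0 := by omega
    subst hj0
    have := getv_replicate (N+1).toNat (0 : Int)
    rw [getv] at this
    simp only [Nat.cast_zero]
    rw [this, dVal_zero]
    rfl
  | succ t ih =>
    intro ht
    have ht' : (t : Int) ≤ N := by push_cast at ht ⊢; omega
    obtain ⟨ihlen, ihval⟩ := ih ht'
    have hsplit : PySem.List.pyRange 1 ((↑(t+1):Int)+1) 1
        = PySem.List.pyRange 1 ((t:Int)+1) 1 ++ [(t:Int)+1] := by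
      rw [show ((↑(t+1):Int)+1) = ((t:Int)+1)+1 by push_cast; ring]
      exact PySem.List.pyRange_one_succ_right (by omega)
    rw [hsplit, List.foldl_append, List.foldl_cons, List.foldl_nil]
    set D := (PySem.List.pyRange 1 ((t:Int)+1) 1).foldl bStep (Array.replicate (N+1).toNat 0)
      with hDdef
    have hbest : aget D ((t:Int)+1-1) = ((dVal t : Nat) : Int) := by
      rw [show (t:Int)+1-1 = (t:Int) by ring]
      exact ihval t le_rfl
    set q := (2*(t+1))/3 with hq
    have hp : PySem.Int.floordiv (2*((t:Int)+1)) 3 = (q : Int) := by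
      rw [PySem.Int.floordiv_eq_ediv_of_pos (by norm_num)]
      omega
    have hA_iff : ((q:Int) + PySem.Int.floordiv (q:Int) 2 = (t:Int)+1 ∧ (q:Int) < (t:Int)+1)
        ↔ (q + q/2 = t+1 ∧ q < t+1) := by
      rw [PySem.Int.floordiv_eq_ediv_of_pos (by norm_num : (0:Int) < 2)]
      constructor <;> intro hh <;> exact ⟨by omega, by omega⟩
    have hB_iff : (((q:Int)+1) + PySem.Int.floordiv ((q:Int)+1) 2 = (t:Int)+1 ∧ (q:Int)+1 < (t:Int)+1)
        ↔ ((q+1) + (q+1)/2 = t+1 ∧ q+1 < t+1) := by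
      rw [PySem.Int.floordiv_eq_ediv_of_pos (by norm_num : (0:Int) < 2)]
      constructor <;> intro hh <;> exact ⟨by omega, by omega⟩
    have hval : bStep D ((t:Int)+1) = aset D ((t:Int)+1) ((dVal (t+1) : Nat) : Int) := by
      simp only [bStep, hp, hbest]
      rw [dVal, ← hq]
      by_cases hA : q + q/2 = t+1 ∧ q < t+1
      · rw [if_pos (hA_iff.mpr hA), dif_pos hA, ihval q (by omega)]
        push_cast
        ring_nf
      · rw [if_neg (fun hc => hA (hA_iff.mp hc)), dif_neg hA]
        by_cases hB : (q+1) + (q+1)/2 = t+1 ∧ q+1 < t+1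
        · have hih := ihval (q+1) (by omega)
          push_cast at hih
          rw [if_pos (hB_iff.mpr hB), dif_pos hB, hih]
          push_cast
          ring_nf
        · rw [if_neg (fun hc => hB (hB_iff.mp hc)), dif_neg hB]
          push_cast
          ring_nf
    rw [hval]
    refine ⟨by rw [size_aset]; exact ihlen, ?_⟩
    intro j hj
    have hgv := getv_pySetD D ((t:Int)+1) (j:Int) ((dVal (t+1) : Nat) : Int)
      (by omega) (by rw [ihlen]; omega) (by omega) (by rw [ihlen]; omega)
    rw [getv, getv] at hgv
    rw [hgv]
    by_cases hj1 : j = t+1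
    · rw [if_pos (by omega), hj1]
    · rw [if_neg (by omega)]
      exact ihval j (by omega)

theorem solve_alt_eq (N K : Int) (hN : 0 ≤ N) :
    solve_alt N K =
      (if ((dVal N.toNat : Nat) : Int) ≤ K ∧ K ≤ N + 1 then "minigimbob" else "water") := by
  obtain ⟨hlen, hval⟩ := bdp_spec N hN N.toNat (by omega)
  have hcast : ((N.toNat : Nat) : Int) = N := by omega
  rw [hcast] at hval
  have h := hval N.toNat le_rfl
  rw [hcast] at h
  simp only [solve_alt]
  rw [h]

theorem solve_spec : Claim_unchanged_solve := by
  unfold Claim_unchanged_solve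
  intro N K _ hPre hnD
  unfold Pre_solve at hPre
  unfold D_solve at hnD
  show solve N K = solve_alt N K
  rw [solve_eq_iterate, solve_alt_eq N K hPre]
  obtain ⟨_, _, hiff, hbit, _, _⟩ := invA_iter N hPre K.toNat
  have h0 := hiff 0 le_rfl hPre
  have hb := hbit 0 le_rfl hPre
  have hri := reach_iff hPre K.toNat
  by_cases hK : 0 ≤ K
  · by_cases hR : ReachR N K.toNat 0
    · rw [if_pos (by have := h0.2 hR; omega),
         if_pos (by obtain ⟨ha, hc⟩ := hri.1 hR; constructor <;> omega)]
    · rw [if_neg (by have hz := h0.1; intro hc; exact hR (hz (by omega))),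
         if_neg (by intro hc; exact hR (hri.2 ⟨by omega, by omega⟩))]
  · have hN0 : N ≠ 0 := fun h => hnD ⟨h, by omega⟩
    rw [if_neg (by
        intro hc
        have := h0.1 (by omega)
        have hKt : K.toNat = 0 := by omega
        rw [hKt] at this
        exact hN0 (this : (0:Int) = N).symm),
      if_neg (by intro hc; omega)]
theorem solve_changed : Claim_changed_solve := by
  unfold Claim_changed_solve; decide
theorem solve_tight : Claim_exact_solve := by
  unfold Claim_exact_solve
  intro N K _ _ hD
  obtain ⟨hN0, hK⟩ := hD
  subst hN0
  have hA : solve 0 K = "minigimbob" := by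
    have hnil : PySem.List.pyRange 1 (K+1) 1 = [] := PySem.List.pyRange_one_eq_nil (by omega)
    simp only [solve, hnil, List.foldl_nil]
    decide
  have hB : solve_alt 0 K = "water" := by
    have hnil : PySem.List.pyRange 1 ((0:Int)+1) 1 = [] := PySem.List.pyRange_one_eq_nil (by norm_num)
    simp only [solve_alt, hnil, List.foldl_nil]
    rw [if_neg]
    intro hc
    obtain ⟨hc1, -⟩ := hc
    rw [show aget (Array.replicate ((0:Int)+1).toNat (0:Int)) 0 = 0 from rfl] at hc1
    omega
  rw [hA, hB]
  decide
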